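-- pv_equiv track=rewrite | github.com/JICIJIANG/variants_network | indra_variants/app/variant_network.py | _add_anchors
-- ===== SOURCE A (Python) =====
-- def _add_anchors(layer_nodes, cross_layer_edges, node_layer):
--     """Insert dummy anchor nodes for edges spanning >1 layer.
--
--     Returns (aug_layers, adj_edges, node_layer) – the augmented graph
--     where every edge connects adjacent layers.
--     """
--     aug = {li: list(ns) for li, ns in layer_nodes.items()}
--     adj_edges: list[tuple] = []
--     _aid = 0
--     for src, tgt, w in cross_layer_edges:
--         ls, lt = node_layer[src], node_layer[tgt]
--         if ls > lt:
--             src, tgt = tgt, src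
--             ls, lt = lt, ls
--         if lt - ls == 1:
--             adj_edges.append((src, tgt, w))
--         else:
--             prev = src
--             for mid in range(ls + 1, lt):
--                 aname = f"__anch_{_aid}"
--                 _aid += 1
--                 aug.setdefault(mid, []).append(aname)
--                 node_layer[aname] = mid
--                 adj_edges.append((prev, aname, w))
--                 prev = aname
--             adj_edges.append((prev, tgt, w))
--     return aug, adj_edges
-- ===== SOURCE B (Python) =====
-- def _add_anchors(layer_nodes, cross_layer_edges, node_layer):
--     """Insert dummy anchor nodes for edges spanning >1 layer.
--
--     Staged re-implementation: pass 1 normalises every edge and assigns its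
--     block of anchor ids by a running prefix sum; pass 2 emits the adjacent
--     edges and a flat anchor list, computing anchor names in closed form from
--     the edge's id base; pass 3 folds the anchors into aug and node_layer
--     (same in-place node_layer mutation as A, performed after the edge passes).
--     """
--     aug = {li: list(ns) for li, ns in layer_nodes.items()}
--     # pass 1: normalise direction and give each edge its anchor-id base
--     norm = []
--     base = 0
--     for src, tgt, w in cross_layer_edges:
--         ls, lt = node_layer[src], node_layer[tgt]
--         if ls > lt:
--             src, tgt, ls, lt = tgt, src, lt, ls
--         norm.append((src, tgt, ls, lt, w, base))
--         base += max(lt - ls - 1, 0)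
--     # pass 2: emit edges and the flat anchor list, names by arithmetic on the base
--     adj_edges = []
--     anchors = []
--     for src, tgt, ls, lt, w, b in norm:
--         names = []
--         for k in range(max(lt - ls - 1, 0)):
--             names.append(f"__anch_{b + k}")
--             anchors.append((ls + 1 + k, names[-1]))
--         nodes = [src] + names + [tgt]
--         for p, q in zip(nodes, nodes[1:]):
--             adj_edges.append((p, q, w))
--     # pass 3: fold the anchors into aug and node_layer
--     for mid, nm in anchors:
--         aug.setdefault(mid, []).append(nm)
--         node_layer[nm] = mid
--     return aug, adj_edges
-- ===== Notes on version B (the rewrite author's own statement) =====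
-- stated objective: alternative
-- what changed: Replaces A's single interleaved loop (threaded anchor counter, prev-pointer, per-edge branch, in-loop dict mutation) by three staged passes: normalise edges and assign anchor-id blocks by a prefix sum, then emit edges with closed-form anchor names, then batch-apply all anchor insertions to aug and node_layer.
-- outside the precondition, e.g. on _add_anchors({}, [('x', 'y', 1)], {}): A raises KeyError, B raises KeyError
import Mathlib
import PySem

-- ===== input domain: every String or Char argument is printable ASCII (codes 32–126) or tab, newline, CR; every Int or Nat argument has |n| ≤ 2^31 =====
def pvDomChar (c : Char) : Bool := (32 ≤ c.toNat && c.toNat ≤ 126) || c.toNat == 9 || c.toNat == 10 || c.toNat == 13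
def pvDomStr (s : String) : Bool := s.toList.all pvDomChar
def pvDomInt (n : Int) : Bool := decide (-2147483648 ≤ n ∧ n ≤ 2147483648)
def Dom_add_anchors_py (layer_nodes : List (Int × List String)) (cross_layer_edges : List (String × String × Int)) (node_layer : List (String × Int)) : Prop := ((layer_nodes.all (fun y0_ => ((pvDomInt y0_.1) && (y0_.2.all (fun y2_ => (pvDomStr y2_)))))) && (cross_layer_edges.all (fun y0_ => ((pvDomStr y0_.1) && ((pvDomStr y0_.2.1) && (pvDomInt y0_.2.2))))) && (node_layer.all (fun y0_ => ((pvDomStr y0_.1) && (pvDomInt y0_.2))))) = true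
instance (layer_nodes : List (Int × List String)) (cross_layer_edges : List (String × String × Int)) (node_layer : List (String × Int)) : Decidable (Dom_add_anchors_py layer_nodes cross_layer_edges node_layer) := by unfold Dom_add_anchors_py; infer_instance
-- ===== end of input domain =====

-- B replaces A's single interleaved loop by three staged passes (prefix-sum anchor-id bases,
-- closed-form anchor names, batch dict mutation); objective: alternative decomposition.
-- Equivalence is about the RETURN value; both programs also mutate node_layer in place,
-- adding the same anchor entries (A during the loop, B in its final pass).

-- ===== PORT A =====
-- inner loop body of A's 'for mid in range(ls+1, lt)' (state: aug, node_layer, adj_edges, _aid, prev)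
def aInnerStep (w : Int)
    (s : PySem.Dict Int (List String) × PySem.Dict String Int × List (String × String × Int) × Int × String)
    (mid : Int) :
    PySem.Dict Int (List String) × PySem.Dict String Int × List (String × String × Int) × Int × String :=
  let (aug, nl, adj, aid, prev) := s
  let aname := "__anch_" ++ PySem.Int.toStr aid
  (aug.modify mid [] (· ++ [aname]),    -- aug.setdefault(mid, []).append(aname)
   nl.insert aname mid,                 -- node_layer[aname] = mid
   adj ++ [(prev, aname, w)], aid + 1, aname)

-- body of A's 'for src, tgt, w in cross_layer_edges' (state: aug, adj_edges, _aid, node_layer)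
def aEdgeStep
    (st : PySem.Dict Int (List String) × List (String × String × Int) × Int × PySem.Dict String Int)
    (e : String × String × Int) :
    PySem.Dict Int (List String) × List (String × String × Int) × Int × PySem.Dict String Int :=
  let (aug, adj, aid, nl) := st
  let (src0, tgt0, w) := e
  let ls0 := nl.getD src0 0    -- node_layer[src]: KeyError when absent, excluded by Pre_
  let lt0 := nl.getD tgt0 0    -- node_layer[tgt]: KeyError when absent, excluded by Pre_
  let (src, tgt, ls, lt) := if ls0 > lt0 then (tgt0, src0, lt0, ls0) else (src0, tgt0, ls0, lt0)
  if lt - ls == 1 then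
    (aug, adj ++ [(src, tgt, w)], aid, nl)
  else
    let r := (PySem.List.pyRange (ls + 1) lt 1).foldl (aInnerStep w) (aug, nl, adj, aid, src)
    let (aug, nl, adj, aid, prev) := r
    (aug, adj ++ [(prev, tgt, w)], aid, nl)

def add_anchors_py (layer_nodes : List (Int × List String)) (cross_layer_edges : List (String × String × Int)) (node_layer : List (String × Int)) : (List (Int × List String)) × (List (String × String × Int)) :=
  -- aug = {li: list(ns) for li, ns in layer_nodes.items()}
  let aug0 : PySem.Dict Int (List String) :=
    layer_nodes.foldl (fun d p => d.insert p.1 p.2) PySem.Dict.empty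
  let st := cross_layer_edges.foldl aEdgeStep (aug0, [], 0, PySem.Dict.ofList node_layer)
  (st.1.items, st.2.1)

-- ===== PORT B =====
-- pass-1 body: normalise the edge's direction and record its anchor-id base (state: norm, base)
def bPass1Step (nl : PySem.Dict String Int)
    (s : List (String × String × Int × Int × Int × Int) × Int) (e : String × String × Int) :
    List (String × String × Int × Int × Int × Int) × Int :=
  let (src0, tgt0, w) := e
  let ls0 := nl.getD src0 0    -- node_layer[src]: KeyError when absent, excluded by Pre_
  let lt0 := nl.getD tgt0 0
  let (src, tgt, ls, lt) := if ls0 > lt0 then (tgt0, src0, lt0, ls0) else (src0, tgt0, ls0, lt0)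
  (s.1 ++ [(src, tgt, ls, lt, w, s.2)], s.2 + max (lt - ls - 1) 0)

-- pass-2 inner loop body: 'for k in range(max(lt-ls-1,0))' (state: names, anchors)
def bNameStep (ls b : Int) (s : List String × List (Int × String)) (k : Int) :
    List String × List (Int × String) :=
  let nm := "__anch_" ++ PySem.Int.toStr (b + k)
  (s.1 ++ [nm], s.2 ++ [(ls + 1 + k, nm)])

-- pass-2 body: emit this edge's chain and collect its anchors (state: adj_edges, anchors)
def bPass2Step (s : List (String × String × Int) × List (Int × String))
    (r : String × String × Int × Int × Int × Int) :
    List (String × String × Int) × List (Int × String) :=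
  let (src, tgt, ls, lt, w, b) := r
  let na := (PySem.List.pyRange 0 (max (lt - ls - 1) 0) 1).foldl (bNameStep ls b) ([], s.2)
  let nodes := [src] ++ na.1 ++ [tgt]
  (s.1 ++ (nodes.zip nodes.tail).map (fun pq => (pq.1, pq.2, w)), na.2)

-- pass-3 body: fold one anchor into aug and node_layer
def bPass3Step (s : PySem.Dict Int (List String) × PySem.Dict String Int) (a : Int × String) :
    PySem.Dict Int (List String) × PySem.Dict String Int :=
  (s.1.modify a.1 [] (· ++ [a.2]), s.2.insert a.2 a.1)

def add_anchors_py_alt (layer_nodes : List (Int × List String)) (cross_layer_edges : List (String × String × Int)) (node_layer : List (String × Int)) : (List (Int × List String)) × (List (String × String × Int)) :=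
  let aug0 : PySem.Dict Int (List String) :=
    layer_nodes.foldl (fun d p => d.insert p.1 p.2) PySem.Dict.empty
  let nl0 := PySem.Dict.ofList node_layer
  let norm := (cross_layer_edges.foldl (bPass1Step nl0) ([], 0)).1
  let r2 := norm.foldl bPass2Step ([], [])
  let fin := r2.2.foldl bPass3Step (aug0, nl0)
  (fin.1.items, r2.1)

-- ===== PRECONDITION & SPEC =====
-- does s start with "__anch_"?
def anchorLike (s : String) : Bool := s.toList.take 7 == "__anch_".toList

-- is cs a canonical decimal numeral (nonempty, digits only, no leading zero)?
def canonDigits (cs : List Char) : Bool :=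
  !cs.isEmpty && cs.all Char.isDigit && (cs == ['0'] || cs.head? != some '0')

-- is s exactly a generated anchor name "__anch_<k>" for some k ≥ 0?
def anchorName (s : String) : Bool := anchorLike s && canonDigits (s.toList.drop 7)

-- Pre_ excludes edges whose endpoint is missing from the given node_layer (A raises KeyError
-- there) or is exactly a canonical anchor name "__anch_<k>", on which A's in-loop mutation of
-- node_layer can make a later lookup see a freshly created anchor — an accident of A's
-- interleaving (see cites).
def Pre_add_anchors_py (layer_nodes : List (Int × List String)) (cross_layer_edges : List (String × String × Int)) (node_layer : List (String × Int)) : Prop :=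
  ∀ e ∈ cross_layer_edges,
    e.1 ∈ node_layer.map Prod.fst ∧ e.2.1 ∈ node_layer.map Prod.fst ∧
    anchorName e.1 = false ∧ anchorName e.2.1 = false
instance (layer_nodes : List (Int × List String)) (cross_layer_edges : List (String × String × Int)) (node_layer : List (String × Int)) : Decidable (Pre_add_anchors_py layer_nodes cross_layer_edges node_layer) := by unfold Pre_add_anchors_py; infer_instance

def pvWitness_add_anchors_py : (List (Int × List String)) × (List (String × String × Int)) × (List (String × Int)) :=
  ([(0, ["a"]), (2, ["b"])], [("a", "b", 5)], [("a", 0), ("b", 2)])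

def Spec_add_anchors_py (layer_nodes : List (Int × List String)) (cross_layer_edges : List (String × String × Int)) (node_layer : List (String × Int)) (out : (List (Int × List String)) × (List (String × String × Int))) : Prop := out = add_anchors_py_alt layer_nodes cross_layer_edges node_layer
instance (layer_nodes : List (Int × List String)) (cross_layer_edges : List (String × String × Int)) (node_layer : List (String × Int)) (out : (List (Int × List String)) × (List (String × String × Int))) : Decidable (Spec_add_anchors_py layer_nodes cross_layer_edges node_layer out) := by unfold Spec_add_anchors_py; infer_instance

-- ===== CLAIM =====
def Claim_equal_add_anchors_py : Prop := ∀ (layer_nodes : List (Int × List String)) (cross_layer_edges : List (String × String × Int)) (node_layer : List (String × Int)), Dom_add_anchors_py layer_nodes cross_layer_edges node_layer → Pre_add_anchors_py layer_nodes cross_layer_edges node_layer → Spec_add_anchors_py layer_nodes cross_layer_edges node_layer (add_anchors_py layer_nodes cross_layer_edges node_layer)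

-- ===== LEMMAS AND PROOFS =====

-- the (mid, name) anchor records created from counter aid along the layer list ms
def anchRec : Int → List Int → List (Int × String)
  | _, [] => []
  | aid, m :: ms => (m, "__anch_" ++ PySem.Int.toStr aid) :: anchRec (aid + 1) ms

def applyAug (aug : PySem.Dict Int (List String)) (l : List (Int × String)) :
    PySem.Dict Int (List String) :=
  l.foldl (fun a p => a.modify p.1 [] (· ++ [p.2])) aug

def applyNL (nl : PySem.Dict String Int) (l : List (Int × String)) : PySem.Dict String Int :=
  l.foldl (fun n p => n.insert p.2 p.1) nl

-- chain p l w = the consecutive edges along the path p :: l, each with weight w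
def chain : String → List String → Int → List (String × String × Int)
  | _, [], _ => []
  | p, x :: l, w => (p, x, w) :: chain x l w

-- the direction-normalised (src, tgt, ls, lt) of an edge, lookups in the fixed nl0
def normQ (nl0 : PySem.Dict String Int) (s0 t0 : String) : String × String × Int × Int :=
  if nl0.getD s0 0 > nl0.getD t0 0 then (t0, s0, nl0.getD t0 0, nl0.getD s0 0)
  else (s0, t0, nl0.getD s0 0, nl0.getD t0 0)

-- the pure per-edge spec: anchor records and chain edges of all edges, lookups in the fixed nl0
def S (nl0 : PySem.Dict String Int) :
    List (String × String × Int) → Int → List (Int × String) × List (String × String × Int)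
  | [], _ => ([], [])
  | (s0, t0, w) :: es, aid =>
    let q := normQ nl0 s0 t0
    let ans := anchRec aid (PySem.List.pyRange (q.2.2.1 + 1) q.2.2.2 1)
    let rest := S nl0 es (aid + max (q.2.2.2 - q.2.2.1 - 1) 0)
    (ans ++ rest.1, chain q.1 (ans.map Prod.snd ++ [q.2.1]) w ++ rest.2)

-- B's pass-1 output, recursively (the base threading mirrors bPass1Step)
def normList (nl0 : PySem.Dict String Int) :
    List (String × String × Int) → Int → List (String × String × Int × Int × Int × Int)
  | [], _ => []
  | (s0, t0, w) :: es, b =>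
    let q := normQ nl0 s0 t0
    (q.1, q.2.1, q.2.2.1, q.2.2.2, w, b) ::
      normList nl0 es (b + max (q.2.2.2 - q.2.2.1 - 1) 0)

theorem chain_eq_pairs (l : List String) (p : String) (w : Int) :
    (((p :: l).zip (p :: l).tail).map (fun pq => (pq.1, pq.2, w))) = chain p l w := by
  induction l generalizing p with
  | nil => simp [chain]
  | cons x l ih =>
      have h := ih x
      simp only [List.tail_cons] at h
      simp only [List.tail_cons, List.zip_cons_cons, List.map_cons, chain, h]

theorem getLastD_cons_cons (l : List String) (x p : String) :
    (x :: l).getLast?.getD p = l.getLast?.getD x := by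
  cases l with
  | nil => rfl
  | cons y l =>
      cases h : (y :: l).getLast? with
      | none => simp at h
      | some a => simp [List.getLast?_cons_cons, h]

theorem chain_snoc (l : List String) (p t : String) (w : Int) :
    chain p (l ++ [t]) w = chain p l w ++ [(l.getLastD p, t, w)] := by
  induction l generalizing p with
  | nil => simp [chain]
  | cons x l ih => simp [chain, ih x, getLastD_cons_cons]

theorem take7_append (l m : List Char) (h : l.length = 7) : (l ++ m).take 7 = l := by
  rw [List.take_append_of_le_length (by omega), List.take_of_length_le (by omega)]

theorem anchorLike_anch (t : String) : anchorLike ("__anch_" ++ t) = true := by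
  simp only [anchorLike, String.toList_append]
  rw [take7_append _ _ (by decide)]
  simp

theorem drop7_append (l m : List Char) (h : l.length = 7) : (l ++ m).drop 7 = m := by
  rw [List.drop_append_of_le_length (by omega), List.drop_of_length_le (by omega)]
  simp

-- Nat.toDigitsCore produces a nonempty digit string without a leading zero (for n ≠ 0)
theorem toDigitsCore_shape (f : Nat) :
    ∀ (n : Nat) (ds : List Char), n < f →
      ∃ out, Nat.toDigitsCore 10 f n ds = out ++ ds ∧ out ≠ [] ∧
        out.all Char.isDigit = true ∧ (n ≠ 0 → out.head? ≠ some '0') := by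
  induction f with
  | zero => intro n ds h; omega
  | succ f ih =>
      intro n ds h
      rw [Nat.toDigitsCore]
      by_cases h0 : n / 10 = 0
      · refine ⟨[Nat.digitChar (n % 10)], by simp [h0], by simp, ?_, ?_⟩
        · have h10 : n % 10 < 10 := Nat.mod_lt _ (by omega)
          interval_cases h' : n % 10 <;> simp [Nat.digitChar]
        · intro hn
          have hm : n % 10 ≠ 0 := by omega
          have h10 : n % 10 < 10 := Nat.mod_lt _ (by omega)
          interval_cases h' : n % 10 <;> simp_all [Nat.digitChar]
      · have hlt : n / 10 < f := by omega
        obtain ⟨out, heq, hne, hdig, hhead⟩ := ih (n / 10) (Nat.digitChar (n % 10) :: ds) hlt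
        refine ⟨out ++ [Nat.digitChar (n % 10)], ?_, by simp, ?_, ?_⟩
        · simp [h0, heq]
        · have h10 : n % 10 < 10 := Nat.mod_lt _ (by omega)
          simp only [List.all_append, hdig, Bool.true_and, List.all_cons, List.all_nil,
            Bool.and_true]
          interval_cases h' : n % 10 <;> simp [Nat.digitChar]
        · intro _
          rcases out with _ | ⟨c, cs⟩
          · exact absurd rfl hne
          · simpa using hhead h0

theorem canonDigits_toStr (aid : Int) (h : 0 ≤ aid) :
    canonDigits (PySem.Int.toStr aid).toList = true := by
  rw [PySem.Int.toList_toStr]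
  by_cases h0 : aid = 0
  · subst h0; decide
  · have : PySem.Int.toChars aid = Nat.toDigits 10 aid.toNat := by
      simp [PySem.Int.toChars, show ¬ aid < 0 by omega]
    rw [this]
    obtain ⟨out, heq, hne, hdig, hhead⟩ :=
      toDigitsCore_shape (aid.toNat + 1) aid.toNat [] (by omega)
    rw [Nat.toDigits, heq, List.append_nil]
    have hh := hhead (by omega)
    simp [canonDigits, hne, hdig, hh]

theorem anchorName_anch (aid : Int) (h : 0 ≤ aid) :
    anchorName ("__anch_" ++ PySem.Int.toStr aid) = true := by
  simp only [anchorName, anchorLike_anch, Bool.true_and, String.toList_append]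
  rw [drop7_append _ _ (by decide)]
  exact canonDigits_toStr aid h

theorem anchRec_snd_anchorName (ms : List Int) :
    ∀ aid, 0 ≤ aid → ∀ p ∈ anchRec aid ms, anchorName p.2 = true := by
  induction ms with
  | nil => intro aid _ p hp; simp [anchRec] at hp
  | cons m ms ih =>
      intro aid haid p hp
      simp only [anchRec, List.mem_cons] at hp
      rcases hp with h | h
      · subst h; exact anchorName_anch _ haid
      · exact ih (aid + 1) (by omega) p h

theorem anchRec_length (ms : List Int) : ∀ aid, (anchRec aid ms).length = ms.length := by
  induction ms with
  | nil => intro aid; rfl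
  | cons m ms ih => intro aid; simp [anchRec, ih]

theorem getD_applyNL (l : List (Int × String)) :
    ∀ (nl : PySem.Dict String Int) (k : String), anchorName k = false →
      (∀ p ∈ l, anchorName p.2 = true) → (applyNL nl l).getD k 0 = nl.getD k 0 := by
  induction l with
  | nil => intro nl k _ _; rfl
  | cons p l ih =>
      intro nl k hk hl
      have h1 : (applyNL (nl.insert p.2 p.1) l).getD k 0 = (nl.insert p.2 p.1).getD k 0 :=
        ih _ k hk (fun q hq => hl q (List.mem_cons_of_mem _ hq))
      have hp : anchorName p.2 = true := hl p List.mem_cons_self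
      have hne : k ≠ p.2 := by
        intro hkp; rw [hkp, hp] at hk; exact absurd hk (by simp)
      calc (applyNL nl (p :: l)).getD k 0 = (applyNL (nl.insert p.2 p.1) l).getD k 0 := rfl
        _ = (nl.insert p.2 p.1).getD k 0 := h1
        _ = nl.getD k 0 := by rw [PySem.Dict.getD_insert, if_neg hne]

theorem applyAug_append (aug : PySem.Dict Int (List String)) (l m : List (Int × String)) :
    applyAug aug (l ++ m) = applyAug (applyAug aug l) m := by
  simp [applyAug, List.foldl_append]

theorem applyNL_append (nl : PySem.Dict String Int) (l m : List (Int × String)) :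
    applyNL nl (l ++ m) = applyNL (applyNL nl l) m := by
  simp [applyNL, List.foldl_append]

-- A's inner loop, characterised
theorem aInner_eq (w : Int) (ms : List Int) :
    ∀ aug nl adj aid prev,
      ms.foldl (aInnerStep w) (aug, nl, adj, aid, prev) =
        (applyAug aug (anchRec aid ms), applyNL nl (anchRec aid ms),
         adj ++ chain prev ((anchRec aid ms).map Prod.snd) w,
         aid + ms.length, ((anchRec aid ms).map Prod.snd).getLastD prev) := by
  induction ms with
  | nil =>
      intro aug nl adj aid prev
      simp [anchRec, applyAug, applyNL, chain]
  | cons m ms ih =>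
      intro aug nl adj aid prev
      simp only [List.foldl_cons, aInnerStep, ih, anchRec, List.map_cons, chain,
        List.getLastD_cons, List.length_cons, Prod.mk.injEq, applyAug, applyNL]
      refine ⟨trivial, trivial, by simp, by push_cast; ring, trivial⟩

-- B's pass-2 inner loop, characterised
theorem bName_eq (ls b : Int) (ks : List Int) :
    ∀ names anchors,
      ks.foldl (bNameStep ls b) (names, anchors) =
        (names ++ ks.map (fun k => "__anch_" ++ PySem.Int.toStr (b + k)),
         anchors ++ ks.map (fun k => ((ls + 1 + k : Int), "__anch_" ++ PySem.Int.toStr (b + k)))) := by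
  induction ks with
  | nil => intro names anchors; simp
  | cons k ks ih =>
      intro names anchors
      simp only [List.foldl_cons, bNameStep, ih, List.map_cons]
      simp

-- reindexing a closed-form anchor list into anchRec form
theorem reindex (n : Nat) :
    ∀ (lo hi off aid : Int), hi - lo = n →
      (PySem.List.pyRange lo hi 1).map
          (fun k => ((off + k : Int), "__anch_" ++ PySem.Int.toStr (aid + k)))
        = anchRec (aid + lo) (PySem.List.pyRange (off + lo) (off + hi) 1) := by
  induction n with
  | zero =>
      intro lo hi off aid h
      rw [PySem.List.pyRange_one_eq_nil (by omega), PySem.List.pyRange_one_eq_nil (by omega)]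
      rfl
  | succ n ih =>
      intro lo hi off aid h
      rw [PySem.List.pyRange_one_cons (show lo < hi by omega),
          PySem.List.pyRange_one_cons (show off + lo < off + hi by omega)]
      simp only [List.map_cons, anchRec]
      congr 1
      rw [ih (lo + 1) hi off aid (by omega),
          show aid + lo + 1 = aid + (lo + 1) by ring,
          show off + lo + 1 = off + (lo + 1) by ring]

theorem range_clip (ls lt : Int) :
    PySem.List.pyRange (ls + 1) (ls + 1 + max (lt - ls - 1) 0) 1 =
      PySem.List.pyRange (ls + 1) lt 1 := by
  by_cases h : lt ≤ ls + 1
  · rw [PySem.List.pyRange_one_eq_nil (by omega), PySem.List.pyRange_one_eq_nil (by omega)]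
  · congr 1; omega

-- B's pass-2 closed-form anchors equal anchRec over the span range
theorem anchors_closed (ls lt b : Int) :
    (PySem.List.pyRange 0 (max (lt - ls - 1) 0) 1).map
        (fun k => ((ls + 1 + k : Int), "__anch_" ++ PySem.Int.toStr (b + k)))
      = anchRec b (PySem.List.pyRange (ls + 1) lt 1) := by
  have h := reindex (max (lt - ls - 1) 0).toNat 0 (max (lt - ls - 1) 0) (ls + 1) b (by omega)
  rw [h, show b + 0 = b by ring, show ls + 1 + 0 = ls + 1 by ring, range_clip]

theorem names_closed (ls lt b : Int) :
    (PySem.List.pyRange 0 (max (lt - ls - 1) 0) 1).map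
        (fun k => "__anch_" ++ PySem.Int.toStr (b + k))
      = (anchRec b (PySem.List.pyRange (ls + 1) lt 1)).map Prod.snd := by
  rw [← anchors_closed ls lt b, List.map_map]
  rfl

-- one step of pass 1, in normQ form
theorem bPass1Step_eq (nl0 : PySem.Dict String Int) (acc : List (String × String × Int × Int × Int × Int))
    (b : Int) (s0 t0 : String) (w : Int) :
    bPass1Step nl0 (acc, b) (s0, t0, w) =
      (acc ++ [((normQ nl0 s0 t0).1, (normQ nl0 s0 t0).2.1, (normQ nl0 s0 t0).2.2.1,
                (normQ nl0 s0 t0).2.2.2, w, b)],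
       b + max ((normQ nl0 s0 t0).2.2.2 - (normQ nl0 s0 t0).2.2.1 - 1) 0) := by
  by_cases h : nl0.getD s0 0 > nl0.getD t0 0 <;> simp [bPass1Step, normQ, h]

-- pass 1 produces normList
theorem pass1_eq (nl0 : PySem.Dict String Int) (es : List (String × String × Int)) :
    ∀ acc b, (es.foldl (bPass1Step nl0) (acc, b)).1 = acc ++ normList nl0 es b := by
  induction es with
  | nil => intro acc b; simp [normList]
  | cons e es ih =>
      intro acc b
      obtain ⟨s0, t0, w⟩ := e
      simp only [List.foldl_cons, bPass1Step_eq, normList, ih]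
      simp

-- pass 2 over normList produces S
theorem pass2_eq (nl0 : PySem.Dict String Int) (es : List (String × String × Int)) :
    ∀ b adj anchors,
      ((normList nl0 es b).foldl bPass2Step (adj, anchors)) =
        (adj ++ (S nl0 es b).2, anchors ++ (S nl0 es b).1) := by
  induction es with
  | nil => intro b adj anchors; simp [normList, S]
  | cons e es ih =>
      intro b adj anchors
      obtain ⟨s0, t0, w⟩ := e
      simp only [normList, S, List.foldl_cons, bPass2Step, bName_eq, List.nil_append]
      rw [anchors_closed, names_closed, ih]
      have hz : (([(normQ nl0 s0 t0).1] ++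
            ((anchRec b (PySem.List.pyRange ((normQ nl0 s0 t0).2.2.1 + 1) (normQ nl0 s0 t0).2.2.2 1)).map Prod.snd)
            ++ [(normQ nl0 s0 t0).2.1]) : List String)
          = (normQ nl0 s0 t0).1 ::
            (((anchRec b (PySem.List.pyRange ((normQ nl0 s0 t0).2.2.1 + 1) (normQ nl0 s0 t0).2.2.2 1)).map Prod.snd)
            ++ [(normQ nl0 s0 t0).2.1]) := by simp
      rw [hz, chain_eq_pairs]
      simp [List.append_assoc]

-- pass 3: the aug component is applyAug
theorem pass3_eq (l : List (Int × String)) :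
    ∀ aug nl, (l.foldl bPass3Step (aug, nl)).1 = applyAug aug l := by
  induction l with
  | nil => intro aug nl; rfl
  | cons p l ih => intro aug nl; simpa [bPass3Step, applyAug, List.foldl_cons] using ih _ _

-- the two branches of A's edge body, characterised
theorem aEdge_branch (aug : PySem.Dict Int (List String)) (adj : List (String × String × Int))
    (aid : Int) (nl : PySem.Dict String Int) (s t : String) (ls lt w : Int) :
    (if lt - ls == 1 then
      ((aug, adj ++ [(s, t, w)], aid, nl) :
        PySem.Dict Int (List String) × List (String × String × Int) × Int × PySem.Dict String Int)
    else
      let r := (PySem.List.pyRange (ls + 1) lt 1).foldl (aInnerStep w) (aug, nl, adj, aid, s)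
      let (aug, nl, adj, aid, prev) := r
      (aug, adj ++ [(prev, t, w)], aid, nl)) =
    (applyAug aug (anchRec aid (PySem.List.pyRange (ls + 1) lt 1)),
     adj ++ chain s ((anchRec aid (PySem.List.pyRange (ls + 1) lt 1)).map Prod.snd ++ [t]) w,
     aid + max (lt - ls - 1) 0,
     applyNL nl (anchRec aid (PySem.List.pyRange (ls + 1) lt 1))) := by
  by_cases h2 : lt - ls = 1
  · rw [if_pos (by simpa using h2), PySem.List.pyRange_one_eq_nil (by omega)]
    simp [anchRec, applyAug, applyNL, chain, show max (lt - ls - 1) 0 = 0 by omega]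
  · rw [if_neg (by simpa using h2)]
    simp only [aInner_eq]
    rw [chain_snoc]
    simp [List.append_assoc]
    omega

-- one step of A's edge loop, in normQ form (lookups already rewritten to nl0)
theorem aEdgeStep_eq (nl0 : PySem.Dict String Int)
    (aug : PySem.Dict Int (List String)) (adj : List (String × String × Int)) (aid : Int)
    (nl : PySem.Dict String Int) (s0 t0 : String) (w : Int)
    (hS : nl.getD s0 0 = nl0.getD s0 0) (hT : nl.getD t0 0 = nl0.getD t0 0) :
    aEdgeStep (aug, adj, aid, nl) (s0, t0, w) =
      (applyAug aug (anchRec aid (PySem.List.pyRange ((normQ nl0 s0 t0).2.2.1 + 1) (normQ nl0 s0 t0).2.2.2 1)),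
       adj ++ chain (normQ nl0 s0 t0).1
         ((anchRec aid (PySem.List.pyRange ((normQ nl0 s0 t0).2.2.1 + 1) (normQ nl0 s0 t0).2.2.2 1)).map Prod.snd
           ++ [(normQ nl0 s0 t0).2.1]) w,
       aid + max ((normQ nl0 s0 t0).2.2.2 - (normQ nl0 s0 t0).2.2.1 - 1) 0,
       applyNL nl (anchRec aid (PySem.List.pyRange ((normQ nl0 s0 t0).2.2.1 + 1) (normQ nl0 s0 t0).2.2.2 1))) := by
  by_cases h : nl0.getD s0 0 > nl0.getD t0 0 <;>
    simp only [aEdgeStep, hS, hT, normQ, h, if_true, if_false] <;>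
    exact aEdge_branch ..

-- A's edge loop, characterised by S under the lookup invariant
theorem aMain (nl0 : PySem.Dict String Int) (es : List (String × String × Int)) :
    ∀ aug adj aid nl, 0 ≤ aid →
      (∀ e ∈ es, anchorName e.1 = false ∧ anchorName e.2.1 = false) →
      (∀ k, anchorName k = false → nl.getD k 0 = nl0.getD k 0) →
      es.foldl aEdgeStep (aug, adj, aid, nl) =
        (applyAug aug (S nl0 es aid).1, adj ++ (S nl0 es aid).2,
         aid + ((S nl0 es aid).1.length : Int), applyNL nl (S nl0 es aid).1) := by
  induction es with
  | nil => intro aug adj aid nl _ _ _; simp [S, applyAug, applyNL]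
  | cons e es ih =>
      intro aug adj aid nl haid h hnl
      obtain ⟨s0, t0, w⟩ := e
      have he := h _ List.mem_cons_self
      have hstep := aEdgeStep_eq nl0 aug adj aid nl s0 t0 w (hnl s0 he.1) (hnl t0 he.2)
      have hinv : ∀ k, anchorName k = false →
          (applyNL nl (anchRec aid (PySem.List.pyRange ((normQ nl0 s0 t0).2.2.1 + 1)
            (normQ nl0 s0 t0).2.2.2 1))).getD k 0 = nl0.getD k 0 := by
        intro k hk
        rw [getD_applyNL _ _ _ hk (anchRec_snd_anchorName _ _ haid), hnl k hk]
      have haid' : 0 ≤ aid + max ((normQ nl0 s0 t0).2.2.2 - (normQ nl0 s0 t0).2.2.1 - 1) 0 := by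
        have := le_max_right ((normQ nl0 s0 t0).2.2.2 - (normQ nl0 s0 t0).2.2.1 - 1) (0 : Int)
        omega
      simp only [List.foldl_cons, hstep,
        ih _ _ _ _ haid' (fun e' he' => h e' (List.mem_cons_of_mem _ he')) hinv, S]
      refine Prod.ext ?_ (Prod.ext ?_ (Prod.ext ?_ ?_)) <;>
        simp [applyAug_append, applyNL_append, List.append_assoc, List.length_append,
          anchRec_length]
      omega

-- ===== VERDICT =====
theorem add_anchors_py_spec : Claim_equal_add_anchors_py := by
  intro layer_nodes cross_layer_edges node_layer _ hpre
  unfold Spec_add_anchors_py add_anchors_py add_anchors_py_alt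
  have hmain := aMain (PySem.Dict.ofList node_layer) cross_layer_edges
    (layer_nodes.foldl (fun d p => d.insert p.1 p.2) PySem.Dict.empty) [] 0
    (PySem.Dict.ofList node_layer) (le_refl 0)
    (fun e he => ⟨(hpre e he).2.2.1, (hpre e he).2.2.2⟩)
    (fun k _ => rfl)
  simp only [hmain, pass1_eq, pass2_eq, pass3_eq, List.nil_append]
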